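-- pv_equiv track=rewrite | github.com/RoscaMaria/lab3AI | rucsac.py | copilValid
-- ===== SOURCE A (Python) =====
-- def fctFitness(obiecte, sol, greutateTotala):
--     greutate, valoare = evaluare(obiecte, sol)
--     return greutate <= greutateTotala, valoare
--
-- def evaluare(obiecte, sol):
--     greutate = 0
--     valoare = 0
--     l = len(obiecte)
--     for i in range(l - 1):
--         greutate = greutate + sol[i] * obiecte[i][1]
--         valoare = valoare + sol[i] * obiecte[i][0]
--     return greutate, valoare
--
-- def copilValid(copil, obiecte, greutateTotala):
--     ok = 0
--     i = 0
--     while ok == 0: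
--         if fctFitness(obiecte, copil, greutateTotala)[0]:
--             ok = 1
--         else:
--             if copil[i] == 1:
--                 copil[i] = 0
--         i = i+1
--     return copil
-- ===== SOURCE B (Python) =====
-- def copilValid(copil, obiecte, greutateTotala):
--     # One-pass: compute the (first l-1 items') weight once, then walk the bits,
--     # decrementing the running weight when a 1-bit is flipped off, instead of
--     # re-evaluating the whole solution at every step.  Mutates copil like A.
--     l = len(obiecte)
--     w = 0
--     for j in range(l - 1):
--         w += copil[j] * obiecte[j][1]
--     i = 0
--     while w > greutateTotala:
--         if copil[i] == 1:
--             copil[i] = 0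
--             if i < l - 1:
--                 w -= obiecte[i][1]
--         i += 1
--     return copil
-- ===== Notes on version B (the rewrite author's own statement) =====
-- stated objective: alternative
-- what changed: B computes the knapsack weight once and updates it incrementally when a bit is flipped off, instead of A's re-evaluating the whole solution from scratch at every step of the repair loop; intended to cut the per-step cost, measured 1.72x at the largest size but not consistently, so no speed is claimed.
import Mathlib
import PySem

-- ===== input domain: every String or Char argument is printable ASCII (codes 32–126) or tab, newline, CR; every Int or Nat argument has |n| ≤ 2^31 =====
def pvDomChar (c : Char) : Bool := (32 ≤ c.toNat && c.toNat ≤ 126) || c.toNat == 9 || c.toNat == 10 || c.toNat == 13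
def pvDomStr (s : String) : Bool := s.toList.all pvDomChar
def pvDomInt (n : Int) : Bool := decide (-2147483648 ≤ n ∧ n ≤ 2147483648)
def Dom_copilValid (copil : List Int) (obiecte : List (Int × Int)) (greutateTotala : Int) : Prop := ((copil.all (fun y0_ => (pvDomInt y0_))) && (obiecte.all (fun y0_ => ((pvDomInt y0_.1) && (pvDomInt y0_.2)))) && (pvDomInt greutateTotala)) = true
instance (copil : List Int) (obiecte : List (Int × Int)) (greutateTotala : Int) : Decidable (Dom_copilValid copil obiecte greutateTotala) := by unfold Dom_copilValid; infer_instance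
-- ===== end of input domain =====

-- B replaces A's per-step full re-evaluation of the weight by a single initial weight
-- computation plus an incremental decrement when a 1-bit is flipped off (objective: alternative).
-- Both A and B mutate `copil` in place in the same way; the theorem is about the return value.

-- ===== PORT A =====
-- evaluare: sums the first len(obiecte)-1 items; indices are in range under Pre_,
-- so List.getD is exact there (Python raises IndexError out of range).
def pvEvaluare (obiecte : List (Int × Int)) (sol : List Int) : Int × Int :=
  (List.range (obiecte.length - 1)).foldl
    (fun (gv : Int × Int) i =>
      (gv.1 + sol.getD i 0 * (obiecte.getD i (0, 0)).2,
       gv.2 + sol.getD i 0 * (obiecte.getD i (0, 0)).1)) (0, 0)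

def pvFctFitness (obiecte : List (Int × Int)) (sol : List Int) (greutateTotala : Int) : Bool × Int :=
  let gv := pvEvaluare obiecte sol
  (decide (gv.1 ≤ greutateTotala), gv.2)

-- the while loop; under Pre_ it exits via the fitness test before fuel (= len(copil)+1 checks) runs out
def pvLoopA (obiecte : List (Int × Int)) (greutateTotala : Int) :
    Nat → Nat → List Int → List Int
  | 0, _, c => c
  | fuel + 1, i, c =>
    if (pvFctFitness obiecte c greutateTotala).1 then c
    else pvLoopA obiecte greutateTotala fuel (i + 1)
      (if c.getD i 0 = 1 then c.set i 0 else c)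

def copilValid (copil : List Int) (obiecte : List (Int × Int)) (greutateTotala : Int) : List Int :=
  pvLoopA obiecte greutateTotala (copil.length + 1) 0 copil

-- ===== PORT B =====
-- initial weight: w = sum over j < len(obiecte)-1 of copil[j]*obiecte[j][1]
def pvInitW (copil : List Int) (obiecte : List (Int × Int)) : Int :=
  (List.range (obiecte.length - 1)).foldl
    (fun s j => s + copil.getD j 0 * (obiecte.getD j (0, 0)).2) 0

def pvLoopB (obiecte : List (Int × Int)) (greutateTotala : Int) :
    Nat → Nat → Int → List Int → List Int
  | 0, _, _, c => c
  | fuel + 1, i, w, c =>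
    if w ≤ greutateTotala then c
    else if c.getD i 0 = 1 then
      pvLoopB obiecte greutateTotala fuel (i + 1)
        (if i < obiecte.length - 1 then w - (obiecte.getD i (0, 0)).2 else w)
        (c.set i 0)
    else pvLoopB obiecte greutateTotala fuel (i + 1) w c

def copilValid_alt (copil : List Int) (obiecte : List (Int × Int)) (greutateTotala : Int) : List Int :=
  pvLoopB obiecte greutateTotala (copil.length + 1) 0 (pvInitW copil obiecte) copil

-- ===== PRECONDITION & SPEC =====
-- residual weight once the first i positions holding a 1 have been zeroed
def pvResW (copil : List Int) (obiecte : List (Int × Int)) (i : Nat) : Int :=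
  (List.range (obiecte.length - 1)).foldl
    (fun s j => s + (if j < i ∧ copil.getD j 0 = 1 then 0 else copil.getD j 0) * (obiecte.getD j (0, 0)).2) 0

-- Pre_ excludes exactly the inputs on which the Python A raises IndexError (both A and B raise
-- there): copil shorter than the len(obiecte)-1 indices evaluare reads, or no prefix-zeroing
-- within copil's length brings the weight under the cap, so copil[i] runs off the end.
def Pre_copilValid (copil : List Int) (obiecte : List (Int × Int)) (greutateTotala : Int) : Prop :=
  copil.length + 1 ≥ obiecte.length ∧
  ∃ i ∈ List.range (copil.length + 1), pvResW copil obiecte i ≤ greutateTotala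
instance (copil : List Int) (obiecte : List (Int × Int)) (greutateTotala : Int) : Decidable (Pre_copilValid copil obiecte greutateTotala) := by unfold Pre_copilValid; infer_instance

def pvWitness_copilValid : List Int × (List (Int × Int)) × Int := ([1, 1], [(3, 2), (4, 5), (1, 1)], 4)

def Spec_copilValid (copil : List Int) (obiecte : List (Int × Int)) (greutateTotala : Int) (out : List Int) : Prop := out = copilValid_alt copil obiecte greutateTotala
instance (copil : List Int) (obiecte : List (Int × Int)) (greutateTotala : Int) (out : List Int) : Decidable (Spec_copilValid copil obiecte greutateTotala out) := by unfold Spec_copilValid; infer_instance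

-- ===== CLAIM (what is proved, stated in full; the proofs are below) =====
def Claim_equal_copilValid : Prop := ∀ (copil : List Int) (obiecte : List (Int × Int)) (greutateTotala : Int), Dom_copilValid copil obiecte greutateTotala → Pre_copilValid copil obiecte greutateTotala → Spec_copilValid copil obiecte greutateTotala (copilValid copil obiecte greutateTotala)

-- ===== LEMMAS AND PROOFS =====

-- A's fitness weight is B's tracked weight
lemma pv_foldl_fst (obiecte : List (Int × Int)) (sol : List Int) :
    ∀ (l : List Nat) (gv : Int × Int),
      (l.foldl (fun (gv : Int × Int) i =>
          (gv.1 + sol.getD i 0 * (obiecte.getD i (0, 0)).2,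
           gv.2 + sol.getD i 0 * (obiecte.getD i (0, 0)).1)) gv).1
        = l.foldl (fun s i => s + sol.getD i 0 * (obiecte.getD i (0, 0)).2) gv.1
  | [], _ => rfl
  | _ :: l, _ => pv_foldl_fst obiecte sol l _

lemma pv_eval_fst (obiecte : List (Int × Int)) (sol : List Int) :
    (pvEvaluare obiecte sol).1 = pvInitW sol obiecte := by
  simpa [pvEvaluare, pvInitW] using pv_foldl_fst obiecte sol (List.range (obiecte.length - 1)) (0, 0)

lemma pv_sum_shift (g : Nat → Int) (i : Nat) (d : Int) :
    ∀ n : Nat,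
      ((List.range n).map (fun j => if j = i then g j - d else g j)).sum
        = ((List.range n).map g).sum - (if i < n then d else 0)
  | 0 => by simp
  | n + 1 => by
    rw [List.range_succ, List.map_append, List.map_append, List.sum_append, List.sum_append,
      pv_sum_shift g i d n]
    by_cases h1 : i < n
    · rw [if_pos h1, if_pos (by omega)]
      simp only [List.map_cons, List.map_nil, List.sum_cons, List.sum_nil]
      rw [if_neg (by omega)]
      ring
    · by_cases h2 : i = n
      · subst h2
        rw [if_neg h1, if_pos (by omega)]
        simp only [List.map_cons, List.map_nil, List.sum_cons, List.sum_nil, if_true]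
        ring
      · rw [if_neg h1, if_neg (by omega)]
        simp only [List.map_cons, List.map_nil, List.sum_cons, List.sum_nil]
        rw [if_neg (by omega)]
        ring

lemma pv_initW_set (obiecte : List (Int × Int)) (c : List Int) (i : Nat)
    (h : c.getD i 0 = 1) :
    pvInitW (c.set i 0) obiecte
      = pvInitW c obiecte - (if i < obiecte.length - 1 then (obiecte.getD i (0, 0)).2 else 0) := by
  have hi : i < c.length := by
    by_contra hni
    rw [List.getD_eq_getElem?_getD, List.getElem?_eq_none (by omega)] at h
    simp at h
  have hterm : (fun j => (c.set i 0).getD j 0 * (obiecte.getD j (0, 0)).2)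
      = fun j => if j = i then (c.getD j 0 * (obiecte.getD j (0, 0)).2) - (obiecte.getD i (0, 0)).2
                 else c.getD j 0 * (obiecte.getD j (0, 0)).2 := by
    funext j
    by_cases hj : j = i
    · subst hj
      rw [List.getD_eq_getElem?_getD, List.getElem?_set_self (by omega), if_pos rfl]
      rw [List.getD_eq_getElem?_getD] at h
      simp [h]
    · rw [List.getD_eq_getElem?_getD, List.getElem?_set_ne (by omega), if_neg hj,
        ← List.getD_eq_getElem?_getD]
  rw [pvInitW, pvInitW, PySem.List.foldl_add, PySem.List.foldl_add, hterm,
    pv_sum_shift (fun j => c.getD j 0 * (obiecte.getD j (0, 0)).2) i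
      ((obiecte.getD i (0, 0)).2) (obiecte.length - 1)]
  ring

-- the two loops agree whenever B's weight argument is the true weight of the current child
lemma pv_loop_eq (obiecte : List (Int × Int)) (cap : Int) :
    ∀ (fuel i : Nat) (c : List Int),
      pvLoopA obiecte cap fuel i c = pvLoopB obiecte cap fuel i (pvInitW c obiecte) c
  | 0, _, _ => rfl
  | fuel + 1, i, c => by
    simp only [pvLoopA, pvLoopB, pvFctFitness, pv_eval_fst obiecte c]
    by_cases hle : pvInitW c obiecte ≤ cap
    · simp [hle]
    · rw [if_neg (by simpa using hle), if_neg hle]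
      by_cases h1 : c.getD i 0 = 1
      · rw [if_pos h1, if_pos h1, pv_loop_eq obiecte cap fuel (i + 1) (c.set i 0),
          pv_initW_set obiecte c i h1]
        by_cases hlt : i < obiecte.length - 1
        · rw [if_pos hlt, if_pos hlt]
        · rw [if_neg hlt, if_neg hlt]
          norm_num
      · rw [if_neg h1, if_neg h1, pv_loop_eq obiecte cap fuel (i + 1) c]

-- ===== VERDICT (by name: the statement is the Claim_ definition above) =====
theorem copilValid_spec : Claim_equal_copilValid := by
  intro copil obiecte greutateTotala _ _
  unfold Spec_copilValid copilValid copilValid_alt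
  exact pv_loop_eq obiecte greutateTotala (copil.length + 1) 0 copil
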